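-- pv_equiv track=rewrite | github.com/Sjoerd-Spitters/Zeeslag | Zeeslag.py | boot_plaats_checken
-- ===== SOURCE A (Python) =====
-- def boot_plaats_checken(rij,kolom, lengte, richting,bord):
--     for i in range(lengte):
--     # Bepaal de juiste rij en kolom op basis van richting
--         if richting == "horizontaal":
--             ver = rij
--             hor = kolom + i
--
--         else: #richting is verticaal
--             ver = rij + i
--             hor = kolom
--
--         if not (0 <= ver < 10 and 0 <= hor < 10): #controle of de boot past op het raster
--             return False
--
--         for rij_index in range(-1, 2): #Dit loopt door alle vakjes om het vakje wat nu wordt behandeld en als er al wat omheen zit, word er niets geplaatst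
--             for kolom_index in range(-1,2):
--                 buur_rij = ver + rij_index
--                 buur_kolom = hor + kolom_index
--                 if 0 <= buur_rij < 10 and 0 <= buur_kolom < 10:  # checkt of de checker binnen grenzen aan het kijken is, dit voorkomt foutcodes
--                     if bord[buur_rij][buur_kolom] == "x":
--                         return False
--     return True
-- ===== SOURCE B (Python) =====
-- def boot_plaats_checken(rij, kolom, lengte, richting, bord):
--     # B: closed-form fit test first, then membership of the boat cells in a
--     # precomputed forbidden set (every 'x' cell dilated with its 8 neighbours).
--     if lengte <= 0:
--         return True
--     dv, dh = (0, lengte - 1) if richting == "horizontaal" else (lengte - 1, 0)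
--     if not (0 <= rij and 0 <= kolom and rij + dv < 10 and kolom + dh < 10):
--         return False
--     if richting == "horizontaal":
--         cells = [(rij, kolom + i) for i in range(lengte)]
--     else:
--         cells = [(rij + i, kolom) for i in range(lengte)]
--     forbidden = {(r + dr, c + dc)
--                  for r, row in enumerate(bord[:10]) for c, cel in enumerate(row[:10]) if cel == "x"
--                  for dr in (-1, 0, 1) for dc in (-1, 0, 1)}
--     return not any(cell in forbidden for cell in cells)
-- ===== Notes on version B (the rewrite author's own statement) =====
-- stated objective: alternative
-- what changed: Instead of A's per-boat-cell outward 3x3 neighbour scan with early returns, B computes the boat's cells up front, rejects any off-grid cell, and tests the cells against a forbidden set built once by dilating every 'x' cell of the board with its 8 neighbours.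
-- outside the precondition, e.g. on boot_plaats_checken(0, 0, 1, 'verticaal', [['x', '.'], ['.', '.']]): A returns False, B returns False
import Mathlib
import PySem

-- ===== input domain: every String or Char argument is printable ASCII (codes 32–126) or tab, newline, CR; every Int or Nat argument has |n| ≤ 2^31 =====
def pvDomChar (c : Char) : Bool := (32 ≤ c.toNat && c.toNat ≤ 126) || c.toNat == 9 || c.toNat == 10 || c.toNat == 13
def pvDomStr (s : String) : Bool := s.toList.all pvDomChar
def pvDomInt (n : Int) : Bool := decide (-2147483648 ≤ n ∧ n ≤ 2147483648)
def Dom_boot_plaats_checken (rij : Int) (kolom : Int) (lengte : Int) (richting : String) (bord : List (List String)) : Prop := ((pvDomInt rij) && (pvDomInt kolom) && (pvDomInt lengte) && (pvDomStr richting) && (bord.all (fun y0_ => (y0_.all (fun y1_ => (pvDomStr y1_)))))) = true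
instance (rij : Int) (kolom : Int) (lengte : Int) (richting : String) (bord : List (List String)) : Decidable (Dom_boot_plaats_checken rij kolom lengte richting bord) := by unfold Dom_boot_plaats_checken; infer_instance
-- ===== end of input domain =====

-- ===== PORT A =====
-- B does a closed-form fit test and checks the boat cells against a precomputed dilated
-- forbidden set, instead of A's per-cell 3x3 outward scan (objective: alternative).
-- A's inner double loop over range(-1,2): true iff some in-bounds neighbour holds "x"
def pvA_neigh (bord : List (List String)) (ver hor : Int) : Bool :=
  (PySem.List.pyRange (-1) 2 1).any fun ri =>
    (PySem.List.pyRange (-1) 2 1).any fun ki =>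
      let br := ver + ri
      let bk := hor + ki
      if 0 ≤ br ∧ br < 10 ∧ 0 ≤ bk ∧ bk < 10 then
        ((PySem.List.pyGet? bord br).bind fun row => PySem.List.pyGet? row bk) == some "x"
      else false

-- A's outer 'for i in range(lengte)' with its two early 'return False's
-- (recursion on the loop counter, matching Python's lazy range)
def pvA_loop (rij kolom : Int) (richting : String) (bord : List (List String))
    (i lengte : Int) : Bool :=
  if h : i < lengte then
    let ver := if richting == "horizontaal" then rij else rij + i
    let hor := if richting == "horizontaal" then kolom + i else kolom
    if ¬(0 ≤ ver ∧ ver < 10 ∧ 0 ≤ hor ∧ hor < 10) then false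
    else if pvA_neigh bord ver hor then false
    else pvA_loop rij kolom richting bord (i + 1) lengte
  else true
termination_by (lengte - i).toNat
decreasing_by omega

def boot_plaats_checken (rij : Int) (kolom : Int) (lengte : Int) (richting : String) (bord : List (List String)) : Bool :=
  pvA_loop rij kolom richting bord 0 lengte

-- ===== PORT B =====
def pvB_cells (rij kolom lengte : Int) (richting : String) : List (Int × Int) :=
  if richting == "horizontaal" then
    (PySem.List.pyRange 0 lengte 1).map fun i => (rij, kolom + i)
  else
    (PySem.List.pyRange 0 lengte 1).map fun i => (rij + i, kolom)

-- {(r + dr, c + dc) for r, row in enumerate(bord[:10]) for c, cel in enumerate(row[:10])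
--  if cel == "x" for dr in (-1, 0, 1) for dc in (-1, 0, 1)}
def pvB_xs (bord : List (List String)) : List (Int × Int) :=
  (PySem.List.enumerate (PySem.List.slice bord none (some 10)) 0).flatMap fun p =>
    (PySem.List.enumerate (PySem.List.slice p.2 none (some 10)) 0).filterMap fun q =>
      if q.2 == "x" then some (p.1, q.1) else none

def pvB_forbidden (bord : List (List String)) : PySem.Set (Int × Int) :=
  PySem.Set.ofList ((pvB_xs bord).flatMap fun rc =>
    ([-1, 0, 1] : List Int).flatMap fun dr =>
      ([-1, 0, 1] : List Int).map fun dc => (rc.1 + dr, rc.2 + dc))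

def boot_plaats_checken_alt (rij : Int) (kolom : Int) (lengte : Int) (richting : String) (bord : List (List String)) : Bool :=
  if lengte ≤ 0 then true
  else
    let dv : Int := if richting == "horizontaal" then 0 else lengte - 1
    let dh : Int := if richting == "horizontaal" then lengte - 1 else 0
    if ¬(0 ≤ rij ∧ 0 ≤ kolom ∧ rij + dv < 10 ∧ kolom + dh < 10) then false
    else
      let cells := pvB_cells rij kolom lengte richting
      !(cells.any fun c => PySem.Set.contains (pvB_forbidden bord) c)

-- ===== PRECONDITION & SPEC =====
-- Pre_ excludes boards that are not a full 10x10 grid except where A decides without touching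
-- the board (non-positive length, or a first boat cell already off the grid): on smaller boards
-- A can raise IndexError; on those smaller boards where A happens to return, B agrees anyway.
def Pre_boot_plaats_checken (rij : Int) (kolom : Int) (lengte : Int) (richting : String) (bord : List (List String)) : Prop :=
  lengte ≤ 0 ∨ ¬(0 ≤ rij ∧ rij < 10 ∧ 0 ≤ kolom ∧ kolom < 10) ∨
    (10 ≤ bord.length ∧ ∀ row ∈ bord.take 10, 10 ≤ row.length)
instance (rij : Int) (kolom : Int) (lengte : Int) (richting : String) (bord : List (List String)) : Decidable (Pre_boot_plaats_checken rij kolom lengte richting bord) := by unfold Pre_boot_plaats_checken; infer_instance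

def pvWitness_boot_plaats_checken : Int × Int × Int × String × List (List String) :=
  (0, 0, 2, "horizontaal", List.replicate 10 (List.replicate 10 "."))

def Spec_boot_plaats_checken (rij : Int) (kolom : Int) (lengte : Int) (richting : String) (bord : List (List String)) (out : Bool) : Prop := out = boot_plaats_checken_alt rij kolom lengte richting bord
instance (rij : Int) (kolom : Int) (lengte : Int) (richting : String) (bord : List (List String)) (out : Bool) : Decidable (Spec_boot_plaats_checken rij kolom lengte richting bord out) := by unfold Spec_boot_plaats_checken; infer_instance

-- ===== CLAIM (what is proved, stated in full; the proofs are below) =====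
def Claim_equal_boot_plaats_checken : Prop := ∀ (rij : Int) (kolom : Int) (lengte : Int) (richting : String) (bord : List (List String)), Dom_boot_plaats_checken rij kolom lengte richting bord → Pre_boot_plaats_checken rij kolom lengte richting bord → Spec_boot_plaats_checken rij kolom lengte richting bord (boot_plaats_checken rij kolom lengte richting bord)

-- ===== LEMMAS AND PROOFS =====


lemma pv_mem_enumerate {α : Type} (xs : List α) (s : Int) (p : Int × α) :
    p ∈ PySem.List.enumerate xs s ↔ ∃ k : Nat, k < xs.length ∧ p.1 = s + k ∧ xs[k]? = some p.2 := by
  induction xs generalizing s with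
  | nil => simp [PySem.List.enumerate_nil]
  | cons x t ih =>
    rw [PySem.List.enumerate_cons]
    simp only [List.mem_cons, ih, List.length_cons]
    constructor
    · rintro (rfl | ⟨k, hk, h1, h2⟩)
      · exact ⟨0, by omega, by simp, by simp⟩
      · exact ⟨k+1, by omega, by push_cast; omega, by simpa using h2⟩
    · rintro ⟨k, hk, h1, h2⟩
      cases k with
      | zero => left; simp at h2 h1; cases p; simp_all
      | succ k =>
        right
        exact ⟨k, by omega, by push_cast at h1 ⊢; omega, by simpa using h2⟩

lemma pv_slice10 {α : Type} (xs : List α) : PySem.List.slice xs none (some 10) = xs.take 10 := by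
  rw [PySem.List.slice_to xs (by norm_num)]; simp

lemma pv_pyGet?_nonneg {α : Type} (xs : List α) (i : Int) (h : 0 ≤ i) :
    PySem.List.pyGet? xs i = xs[i.toNat]? := by
  conv_lhs => rw [← Int.toNat_of_nonneg h]
  exact PySem.List.pyGet?_natCast ..

lemma pv_mem_xs (bord : List (List String)) (r c : Int) :
    (r, c) ∈ pvB_xs bord ↔ ∃ kr kc : Nat, kr < min 10 bord.length ∧ kc < 10 ∧ r = kr ∧ c = kc ∧
      ∃ row, bord[kr]? = some row ∧ row[kc]? = some "x" := by
  unfold pvB_xs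
  simp only [pv_slice10, List.mem_flatMap, List.mem_filterMap, pv_mem_enumerate]
  constructor
  · rintro ⟨p, ⟨kr, hkr, hp1, hp2⟩, q, ⟨kc, hkc, hq1, hq2⟩, hx⟩
    split_ifs at hx with hxx
    simp only [Option.some.injEq, Prod.mk.injEq] at hx
    obtain ⟨h1, h2⟩ := hx
    simp only [List.length_take] at hkr hkc
    rw [List.getElem?_take_of_lt (by omega)] at hp2 hq2
    refine ⟨kr, kc, by omega, by omega, by omega, by omega, p.2, hp2, ?_⟩
    rw [hq2]; simp only [beq_iff_eq] at hxx; rw [hxx]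
  · rintro ⟨kr, kc, hkr, hkc, rfl, rfl, row, hrow, hcell⟩
    have hrlen : kc < row.length := (List.getElem?_eq_some_iff.mp hcell).1
    refine ⟨(kr, row), ⟨kr, ?_, by simp, ?_⟩, (kc, "x"), ⟨kc, ?_, by simp, ?_⟩, by simp⟩
    · simp only [List.length_take]; omega
    · rw [List.getElem?_take_of_lt (by omega)]; simpa using hrow
    · simp only [List.length_take]; omega
    · rw [List.getElem?_take_of_lt (by omega)]; simpa using hcell

-- the neighbour scan equals membership in the dilated forbidden set (no side conditions needed)
lemma pv_neigh_eq_forbidden (bord : List (List String)) (c : Int × Int) :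
    pvA_neigh bord c.1 c.2 = PySem.Set.contains (pvB_forbidden bord) c := by
  obtain ⟨ver, hor⟩ := c
  rw [Bool.eq_iff_iff, PySem.Set.contains_iff]
  unfold pvB_forbidden pvA_neigh
  rw [PySem.Set.mem_ofList]
  simp only [List.any_eq_true, PySem.List.mem_pyRange_one, List.mem_flatMap, List.mem_map]
  constructor
  · rintro ⟨ri, hri, ki, hki, h⟩
    split_ifs at h with hb
    simp only [beq_iff_eq, Option.bind_eq_some_iff] at h
    obtain ⟨row, hrow, hcell⟩ := h
    rw [pv_pyGet?_nonneg _ _ (by omega)] at hrow hcell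
    have hkrlen : (ver + ri).toNat < bord.length := (List.getElem?_eq_some_iff.mp hrow).1
    refine ⟨((ver + ri).toNat, (hor + ki).toNat),
      (pv_mem_xs bord _ _).mpr ⟨(ver + ri).toNat, (hor + ki).toNat, by omega, by omega,
        rfl, rfl, row, hrow, hcell⟩, -ri, by simp; omega, -ki, by simp; omega, ?_⟩
    simp only [Prod.mk.injEq]; constructor <;> omega
  · rintro ⟨⟨r, c⟩, hmem, dr, hdr, dc, hdc, heq⟩
    obtain ⟨kr, kc, hkr, hkc, rfl, rfl, row, hrow, hcell⟩ := (pv_mem_xs bord r c).mp hmem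
    simp only [List.mem_cons, List.not_mem_nil, or_false] at hdr hdc
    simp only [Prod.mk.injEq] at heq
    refine ⟨-dr, by omega, -dc, by omega, ?_⟩
    rw [if_pos (by omega)]
    have h1 : ver + -dr = ((kr : Nat) : Int) := by omega
    have h2 : hor + -dc = ((kc : Nat) : Int) := by omega
    rw [h1, h2]
    simp [PySem.List.pyGet?_natCast, hrow, hcell]

lemma pv_final (P : Prop) [Decidable P] (l : List (Int × Int)) (q : (Int × Int) → Bool) :
    (decide P && l.all fun c => !q c) = if ¬P then false else !(l.any q) := by
  by_cases h : P
  · rw [if_neg (not_not_intro h), decide_eq_true h, Bool.true_and, List.not_any_eq_all_not]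
  · rw [if_pos h, decide_eq_false h, Bool.false_and]

-- A's counter loop over [i, lengte) is the conjunction of its per-cell tests
lemma pv_loopA_eq_all (rij kolom : Int) (richting : String) (bord : List (List String))
    (i lengte : Int) :
    pvA_loop rij kolom richting bord i lengte =
      (PySem.List.pyRange i lengte 1).all fun j =>
        let ver := if richting == "horizontaal" then rij else rij + j
        let hor := if richting == "horizontaal" then kolom + j else kolom
        decide (0 ≤ ver ∧ ver < 10 ∧ 0 ≤ hor ∧ hor < 10) && !pvA_neigh bord ver hor := by
  rw [pvA_loop]
  by_cases h : i < lengte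
  · rw [dif_pos h, PySem.List.pyRange_one_cons h, List.all_cons,
      pv_loopA_eq_all rij kolom richting bord (i + 1) lengte]
    cases hdir : richting == "horizontaal" <;>
      · simp only [hdir, if_true, if_false, Bool.false_eq_true]
        split_ifs with h1 h2 <;> simp_all [not_le]
  · rw [dif_neg h, PySem.List.pyRange_one_eq_nil (by omega)]
    rfl
termination_by (lengte - i).toNat
decreasing_by omega

lemma pv_all_and (l : List (Int × Int)) (p q : (Int × Int) → Bool) :
    l.all (fun c => p c && q c) = (l.all p && l.all q) := by
  induction l with
  | nil => rfl
  | cons c t ih => cases hp : p c <;> cases hq : q c <;> simp [hp, hq, ih]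

-- the per-cell bounds tests amount to B's closed-form fit test (for a positive length)
lemma pv_fit (rij kolom lengte : Int) (richting : String) (hl : 0 < lengte) :
    (pvB_cells rij kolom lengte richting).all
        (fun c => decide (0 ≤ c.1 ∧ c.1 < 10 ∧ 0 ≤ c.2 ∧ c.2 < 10)) =
      decide (0 ≤ rij ∧ 0 ≤ kolom ∧
        rij + (if richting == "horizontaal" then 0 else lengte - 1) < 10 ∧
        kolom + (if richting == "horizontaal" then lengte - 1 else 0) < 10) := by
  unfold pvB_cells
  cases hdir : richting == "horizontaal" <;>
    · rw [Bool.eq_iff_iff]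
      simp only [hdir, if_true, if_false, Bool.false_eq_true, List.all_map, List.all_eq_true,
        Function.comp_def, PySem.List.mem_pyRange_one, decide_eq_true_eq]
      constructor
      · intro h
        have h0 := h 0 (by omega)
        have h1 := h (lengte - 1) (by omega)
        omega
      · intro h i hi
        omega

-- ===== VERDICT (by name: the statement is the Claim_ definition above) =====
theorem boot_plaats_checken_spec : Claim_equal_boot_plaats_checken := by
  intro rij kolom lengte richting bord _ _
  unfold Spec_boot_plaats_checken boot_plaats_checken boot_plaats_checken_alt
  rw [pv_loopA_eq_all]
  have hcells : (PySem.List.pyRange 0 lengte 1).all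
      (fun j =>
        let ver := if richting == "horizontaal" then rij else rij + j
        let hor := if richting == "horizontaal" then kolom + j else kolom
        decide (0 ≤ ver ∧ ver < 10 ∧ 0 ≤ hor ∧ hor < 10) && !pvA_neigh bord ver hor) =
      (pvB_cells rij kolom lengte richting).all
        (fun c => decide (0 ≤ c.1 ∧ c.1 < 10 ∧ 0 ≤ c.2 ∧ c.2 < 10) && !pvA_neigh bord c.1 c.2) := by
    unfold pvB_cells
    cases hdir : richting == "horizontaal" <;>
      simp only [hdir, if_true, if_false, Bool.false_eq_true, List.all_map, Function.comp_def]
  rw [hcells, pv_all_and]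
  simp only [pv_neigh_eq_forbidden]
  by_cases hl : lengte ≤ 0
  · rw [if_pos hl]
    unfold pvB_cells
    rw [PySem.List.pyRange_one_eq_nil (by omega)]
    cases hdir : richting == "horizontaal" <;> simp [hdir]
  · rw [if_neg hl, pv_fit rij kolom lengte richting (by omega), pv_final]
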